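-- pv_equiv track=rewrite | github.com/Cristina-Wall/CT421_Assignment1 | EvolveToTargetString.py | best_crossover_point
-- ===== SOURCE A (Python) =====
-- def count_fitness_string(input_string, target):
--     curr_fitness = 0
--
--     fitness_temp_array = [int(input_string[i:i + 1] == target[i:i + 1]) for i in range(max(len(input_string), len(target)))]
--     curr_fitness = fitness_temp_array.count(1)
--
--     return curr_fitness
--
-- def single_point_crossover(parent_string1, parent_string2, point):
--     string1 = list(parent_string1)
--     string2 = list(parent_string2)
--
--     for y in range(point, len(parent_string1)):
--         string1[y], string2[y] = string2[y], string1[y]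
--     new_string1 = ''.join(string1)
--     new_string2 = ''.join(string2)
--
--     return new_string1, new_string2
--
-- def best_crossover_point(string1, string2, target_string):
--     best_fitness = 0
--     temp1 = ""
--     temp2 = ""
--     best_cross_point = 0
--
--     for z in range(30):
--         temp1, temp2 = single_point_crossover(string1, string2, z)
--         fit1 = count_fitness_string(temp1, target_string)
--         fit2 = count_fitness_string(temp2, target_string)
--         if fit1 > fit2:
--             if fit1 > best_fitness:
--                 best_fitness = fit1
--                 best_cross_point = z
--         elif fit2 > fit1:
--             if fit2 > best_fitness:
--                 best_fitness = fit2
--                 best_cross_point = z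
--
--     return best_cross_point
-- ===== SOURCE B (Python) =====
-- def best_crossover_point(string1, string2, target_string):
--     n1, n2, nt = len(string1), len(string2), len(target_string)
--     # prefix-sum match arrays: p[k] = number of positions i < k where s[i] == target[i]
--     p1 = [0]
--     c = 0
--     for i, ch in enumerate(string1):
--         if i < nt and ch == target_string[i]:
--             c += 1
--         p1.append(c)
--     p2 = [0]
--     c = 0
--     for i, ch in enumerate(string2):
--         if i < nt and ch == target_string[i]:
--             c += 1
--         p2.append(c)
--     best_fitness = 0
--     best_cross_point = 0
--     for z in range(30):
--         if z < n1:
--             fit1 = p1[z] + p2[n1] - p2[z]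
--             fit2 = p2[z] + p1[n1] - p1[z] + p2[n2] - p2[n1]
--         else:
--             fit1 = p1[n1]
--             fit2 = p2[n2]
--         if fit1 != fit2:
--             hi = fit1 if fit1 > fit2 else fit2
--             if hi > best_fitness:
--                 best_fitness = hi
--                 best_cross_point = z
--     return best_cross_point
-- ===== Notes on version B (the rewrite author's own statement) =====
-- stated objective: faster
-- what changed: Instead of rebuilding both crossover children and rescanning them against the target for each of the 30 points, B builds two prefix-sum match arrays once and reads each point's two fitness values off them in O(1).
import Mathlib
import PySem

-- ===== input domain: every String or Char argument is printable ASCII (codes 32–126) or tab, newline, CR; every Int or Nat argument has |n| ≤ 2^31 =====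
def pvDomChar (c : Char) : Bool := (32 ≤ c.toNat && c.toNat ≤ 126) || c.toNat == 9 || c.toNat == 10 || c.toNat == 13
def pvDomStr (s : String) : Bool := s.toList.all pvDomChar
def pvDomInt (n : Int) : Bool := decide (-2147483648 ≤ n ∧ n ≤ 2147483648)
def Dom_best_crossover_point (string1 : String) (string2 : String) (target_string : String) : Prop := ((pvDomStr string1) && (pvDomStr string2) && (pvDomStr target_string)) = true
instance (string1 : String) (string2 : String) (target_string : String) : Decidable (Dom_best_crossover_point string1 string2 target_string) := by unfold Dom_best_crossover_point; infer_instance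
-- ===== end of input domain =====

-- B replaces the per-point re-crossover and re-scan by two prefix-sum match arrays, giving each
-- crossover point's two fitness values in O(1) (objective: faster; O(n) instead of O(30·n) work).

-- ===== PORT A =====
-- count_fitness_string(input_string, target)
def pvCountFitness (inp tgt : List Char) : Int :=
  let arr := (PySem.List.pyRange 0 (max inp.length tgt.length : Nat) 1).map
    (fun i => if PySem.List.slice inp (some i) (some (i + 1)) = PySem.List.slice tgt (some i) (some (i + 1)) then (1 : Int) else 0)
  PySem.List.count arr 1

-- single_point_crossover(parent_string1, parent_string2, point); the swap loop reads both lists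
-- at index y (pyGetD/pySetD: exact while y is in range for both, the case Pre_ guarantees)
def pvSinglePointCrossover (p1 p2 : List Char) (point : Int) : List Char × List Char :=
  (PySem.List.pyRange point (p1.length : Int) 1).foldl
    (fun (st : List Char × List Char) y =>
      let a := PySem.List.pyGetD st.2 y ' '
      let b := PySem.List.pyGetD st.1 y ' '
      (PySem.List.pySetD st.1 y a, PySem.List.pySetD st.2 y b))
    (p1, p2)

-- one iteration of A's 'for z in range(30)' loop; state = (best_fitness, temp1, temp2, best_cross_point)
def pvStepA (s1 s2 t : List Char) (st : Int × List Char × List Char × Int) (z : Int) :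
    Int × List Char × List Char × Int :=
  let c := pvSinglePointCrossover s1 s2 z
  let fit1 := pvCountFitness c.1 t
  let fit2 := pvCountFitness c.2 t
  if fit1 > fit2 then
    if fit1 > st.1 then (fit1, c.1, c.2, z) else (st.1, c.1, c.2, st.2.2.2)
  else if fit2 > fit1 then
    if fit2 > st.1 then (fit2, c.1, c.2, z) else (st.1, c.1, c.2, st.2.2.2)
  else (st.1, c.1, c.2, st.2.2.2)

def best_crossover_point (string1 : String) (string2 : String) (target_string : String) : Int :=
  let s1 := string1.toList
  let s2 := string2.toList
  let t := target_string.toList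
  ((PySem.List.pyRange 0 30 1).foldl (pvStepA s1 s2 t) (0, [], [], 0)).2.2.2

-- ===== PORT B =====
-- the prefix-array building loop of Source B: state = (p, c)
def pvPrefixB (s t : List Char) : List Int × Int :=
  (PySem.List.enumerate s 0).foldl
    (fun (st : List Int × Int) ic =>
      let c := if ic.1 < (t.length : Int) ∧ ic.2 = PySem.List.pyGetD t ic.1 ' ' then st.2 + 1 else st.2
      (st.1 ++ [c], c))
    ([0], 0)

-- one iteration of Source B's 'for z in range(30)' loop; state = (best_fitness, best_cross_point)
def pvStepB (p1 p2 : List Int) (n1 n2 : Int) (st : Int × Int) (z : Int) : Int × Int :=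
  let fits : Int × Int :=
    if z < n1 then
      (PySem.List.pyGetD p1 z 0 + PySem.List.pyGetD p2 n1 0 - PySem.List.pyGetD p2 z 0,
       PySem.List.pyGetD p2 z 0 + PySem.List.pyGetD p1 n1 0 - PySem.List.pyGetD p1 z 0
         + PySem.List.pyGetD p2 n2 0 - PySem.List.pyGetD p2 n1 0)
    else
      (PySem.List.pyGetD p1 n1 0, PySem.List.pyGetD p2 n2 0)
  if fits.1 ≠ fits.2 then
    let hi := if fits.1 > fits.2 then fits.1 else fits.2
    if hi > st.1 then (hi, z) else st
  else st

def best_crossover_point_alt (string1 : String) (string2 : String) (target_string : String) : Int :=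
  let s1 := string1.toList
  let s2 := string2.toList
  let t := target_string.toList
  let p1 := (pvPrefixB s1 t).1
  let p2 := (pvPrefixB s2 t).1
  ((PySem.List.pyRange 0 30 1).foldl (pvStepB p1 p2 (s1.length : Int) (s2.length : Int)) (0, 0)).2

-- ===== PRECONDITION & SPEC =====
-- Pre_ excludes exactly the inputs where A raises IndexError: whenever len(string1) > len(string2),
-- the swap loop at z = 0 reads string2[y] past its end (B's p2[n1] lookup fails there too).
def Pre_best_crossover_point (string1 : String) (string2 : String) (target_string : String) : Prop :=
  string1.toList.length ≤ string2.toList.length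
instance (string1 : String) (string2 : String) (target_string : String) : Decidable (Pre_best_crossover_point string1 string2 target_string) := by unfold Pre_best_crossover_point; infer_instance

def pvWitness_best_crossover_point : String × String × String := ("ab", "abc", "abc")

def Spec_best_crossover_point (string1 : String) (string2 : String) (target_string : String) (out : Int) : Prop := out = best_crossover_point_alt string1 string2 target_string
instance (string1 : String) (string2 : String) (target_string : String) (out : Int) : Decidable (Spec_best_crossover_point string1 string2 target_string out) := by unfold Spec_best_crossover_point; infer_instance

-- ===== CLAIM (what is proved, stated in full; the proofs are below) =====
def Claim_equal_best_crossover_point : Prop := ∀ (string1 : String) (string2 : String) (target_string : String), Dom_best_crossover_point string1 string2 target_string → Pre_best_crossover_point string1 string2 target_string → Spec_best_crossover_point string1 string2 target_string (best_crossover_point string1 string2 target_string)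

-- ===== LEMMAS AND PROOFS =====

-- number of positions where s and t agree (the "fitness" both programs compute, mathematically)
def pvMC (s t : List Char) : Int :=
  (List.zipWith (fun a b => if a = b then (1 : Int) else 0) s t).sum

lemma pvMC_nil_right (s : List Char) : pvMC s [] = 0 := by
  cases s <;> simp [pvMC]

lemma pvMC_append (x y t : List Char) :
    pvMC (x ++ y) t = pvMC x t + pvMC y (t.drop x.length) := by
  induction x generalizing t with
  | nil => simp [pvMC]
  | cons a x ih =>
    cases t with
    | nil => simp [pvMC]
    | cons b t =>
      have h := ih t
      simp only [pvMC] at h ⊢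
      simp [h]
      ring

lemma pvCF_aux (s : List Char) : ∀ (t : List Char),
    ((List.count (1 : Int) ((List.range (max s.length t.length)).map
      (fun k => if (s.drop k).take 1 = (t.drop k).take 1 then (1 : Int) else 0)) : Nat) : Int)
      = pvMC s t := by
  induction s with
  | nil =>
    intro t
    cases t with
    | nil => simp [pvMC]
    | cons b t =>
      have hz : List.count (1 : Int) ((List.range (max ([] : List Char).length (b :: t).length)).map
          (fun k => if (([] : List Char).drop k).take 1 = ((b :: t).drop k).take 1 then (1 : Int) else 0)) = 0 := by
        rw [List.count_eq_zero]
        intro hmem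
        obtain ⟨k, hk, heq⟩ := List.mem_map.1 hmem
        rw [List.mem_range] at hk
        rw [List.drop_eq_getElem_cons (l := b :: t) (by simpa using hk)] at heq
        simp at heq
      rw [hz]; simp [pvMC]
  | cons a s ih =>
    intro t
    cases t with
    | nil =>
      have hz : List.count (1 : Int) ((List.range (max (a :: s).length ([] : List Char).length)).map
          (fun k => if ((a :: s).drop k).take 1 = (([] : List Char).drop k).take 1 then (1 : Int) else 0)) = 0 := by
        rw [List.count_eq_zero]
        intro hmem
        obtain ⟨k, hk, heq⟩ := List.mem_map.1 hmem
        rw [List.mem_range] at hk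
        rw [List.drop_eq_getElem_cons (l := a :: s) (by simpa using hk)] at heq
        simp at heq
      rw [hz]; simp [pvMC_nil_right]
    | cons b t =>
      have hmax : max (a :: s).length (b :: t).length = max s.length t.length + 1 := by
        simp [Nat.succ_max_succ]
      rw [hmax, List.range_succ_eq_map, List.map_cons, List.map_map]
      have hfun : ((fun k => if ((a :: s).drop k).take 1 = ((b :: t).drop k).take 1 then (1 : Int) else 0) ∘ Nat.succ)
          = (fun k => if (s.drop k).take 1 = (t.drop k).take 1 then (1 : Int) else 0) := by
        funext k; simp [Function.comp]
      rw [hfun]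
      by_cases hab : a = b
      · simp [hab, pvMC, List.zipWith_cons_cons, ih t]
        ring
      · simp [hab, pvMC, List.zipWith_cons_cons, ih t]

lemma pvCountFitness_eq (s t : List Char) : pvCountFitness s t = pvMC s t := by
  have hmap : (PySem.List.pyRange 0 (max s.length t.length : Nat)).map
      (fun i => if PySem.List.slice s (some i) (some (i + 1))
                 = PySem.List.slice t (some i) (some (i + 1)) then (1 : Int) else 0)
      = (List.range (max s.length t.length)).map
        (fun k => if (s.drop k).take 1 = (t.drop k).take 1 then (1 : Int) else 0) := by
    rw [PySem.List.pyRange_zero_natCast, List.map_map]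
    refine List.map_congr_left ?_
    intro k _
    have h1 : ((k : Int) + 1) = ((k + 1 : Nat) : Int) := by push_cast; ring
    simp only [Function.comp, h1, PySem.List.slice_natCast]
    simp
  unfold pvCountFitness
  simp only [hmap, PySem.List.count_eq]
  exact pvCF_aux s t

lemma pvMC_snoc (s t : List Char) (a : Char) :
    pvMC (s ++ [a]) t
      = pvMC s t + (if s.length < t.length ∧ a = t.getD s.length ' ' then (1 : Int) else 0) := by
  rw [pvMC_append]
  congr 1
  by_cases h : s.length < t.length
  · rw [List.getD_eq_getElem t ' ' h]
    simp only [pvMC, List.drop_eq_getElem_cons h, List.zipWith_cons_cons, List.zipWith_nil_left,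
      List.sum_cons, List.sum_nil, add_zero]
    simp [h]
  · rw [List.drop_eq_nil_of_le (by omega)]
    simp [pvMC_nil_right, h]

lemma pvPrefixB_eq (s t : List Char) :
    pvPrefixB s t = ((List.range (s.length + 1)).map (fun k => pvMC (s.take k) t), pvMC s t) := by
  induction s using List.reverseRecOn with
  | nil => simp [pvPrefixB, PySem.List.enumerate, pvMC]
  | append_singleton s a ih =>
    unfold pvPrefixB at ih ⊢
    rw [PySem.List.enumerate_append, List.foldl_append, ih]
    simp only [PySem.List.enumerate_cons, PySem.List.enumerate_nil, List.foldl_cons, List.foldl_nil,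
      zero_add, PySem.List.pyGetD_natCast, Nat.cast_lt]
    have hc : (if s.length < t.length ∧ a = t.getD s.length ' ' then pvMC s t + 1 else pvMC s t)
        = pvMC (s ++ [a]) t := by
      rw [pvMC_snoc]
      split_ifs <;> omega
    rw [Prod.mk.injEq]
    constructor
    · rw [List.length_append, List.length_singleton, List.range_succ (n := s.length + 1), List.map_append]
      congr 1
      · refine List.map_congr_left ?_
        intro k hk
        rw [List.mem_range] at hk
        rw [List.take_append_of_le_length (by omega)]
      · simp only [List.map_cons, List.map_nil]
        rw [List.take_of_length_le (by simp)]
        rw [hc]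
    · rw [hc]

lemma pvTakeSetSucc (l : List Char) (n : Nat) (x : Char) (h : n < l.length) :
    (l.set n x).take (n + 1) = l.take n ++ [x] := by
  rw [List.set_eq_take_cons_drop x h, List.take_append]
  simp [List.length_take, Nat.min_eq_left h.le, List.take_of_length_le]

lemma pvDropSet (x : Char) (l : List Char) (n m : Nat) (h : n < m) :
    (l.set n x).drop m = l.drop m := by
  rw [List.drop_set, if_pos h]

lemma pvSPC_aux : ∀ (k : Nat) (l1 l2 : List Char) (z : Nat), l1.length - z = k →
    z ≤ l1.length → l1.length ≤ l2.length →
    (PySem.List.pyRange (z : Int) (l1.length : Int)).foldl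
      (fun (st : List Char × List Char) y =>
        let a := PySem.List.pyGetD st.2 y ' '
        let b := PySem.List.pyGetD st.1 y ' '
        (PySem.List.pySetD st.1 y a, PySem.List.pySetD st.2 y b)) (l1, l2)
      = (l1.take z ++ (l2.drop z).take (l1.length - z),
         l2.take z ++ l1.drop z ++ l2.drop l1.length) := by
  intro k
  induction k with
  | zero =>
    intro l1 l2 z hk hz h
    have hz' : z = l1.length := by omega
    subst hz'
    rw [PySem.List.pyRange_one_eq_nil (le_refl _)]
    simp only [List.foldl_nil, Nat.sub_self, List.take_zero, List.append_nil, List.take_length,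
      List.drop_length, List.append_nil]
    rw [List.take_append_drop]
  | succ k ih =>
    intro l1 l2 z hk hz h
    have hlt : z < l1.length := by omega
    rw [PySem.List.pyRange_one_cons (by exact_mod_cast hlt)]
    simp only [List.foldl_cons, PySem.List.pyGetD_natCast, PySem.List.pySetD_natCast]
    have hz2 : z < l2.length := by omega
    rw [List.getD_eq_getElem l2 ' ' hz2, List.getD_eq_getElem l1 ' ' hlt]
    have hcast : ((z : Int) + 1) = ((z + 1 : Nat) : Int) := by push_cast; ring
    have hlen : ((l1.set z l2[z]).length : Int) = (l1.length : Int) := by simp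
    rw [hcast]
    have := ih (l1.set z l2[z]) (l2.set z l1[z]) (z + 1) (by simp; omega) (by simp; omega) (by simp; omega)
    simp only [List.length_set] at this
    rw [this]
    rw [Prod.mk.injEq]
    constructor
    · rw [pvTakeSetSucc l1 z l2[z] hlt, pvDropSet l1[z] l2 z (z + 1) (by omega)]
      rw [List.drop_eq_getElem_cons hz2]
      have h1 : l1.length - z = (l1.length - (z + 1)) + 1 := by omega
      rw [h1, List.take_succ_cons, List.append_assoc]
      simp
    · rw [pvTakeSetSucc l2 z l1[z] hz2, pvDropSet l2[z] l1 z (z + 1) (by omega),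
        pvDropSet l1[z] l2 z l1.length (by omega)]
      rw [List.append_assoc, List.append_assoc]
      have hdz : List.drop z l1 = l1[z] :: List.drop (z + 1) l1 := List.drop_eq_getElem_cons hlt
      rw [hdz, List.cons_append]
      simp
      rw [hdz, List.cons_append]

lemma pvSPC_eq (l1 l2 : List Char) (z : Nat) (hz : z ≤ l1.length) (h : l1.length ≤ l2.length) :
    pvSinglePointCrossover l1 l2 (z : Int) =
      (l1.take z ++ (l2.drop z).take (l1.length - z),
       l2.take z ++ l1.drop z ++ l2.drop l1.length) := by
  exact pvSPC_aux (l1.length - z) l1 l2 z rfl hz h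

lemma pvFits_eq (s1 s2 t : List Char) (h : s1.length ≤ s2.length) (z : Int) (hz : 0 ≤ z) :
    (pvCountFitness (pvSinglePointCrossover s1 s2 z).1 t,
     pvCountFitness (pvSinglePointCrossover s1 s2 z).2 t) =
    (if z < (s1.length : Int) then
      (PySem.List.pyGetD (pvPrefixB s1 t).1 z 0 + PySem.List.pyGetD (pvPrefixB s2 t).1 (s1.length : Int) 0 - PySem.List.pyGetD (pvPrefixB s2 t).1 z 0,
       PySem.List.pyGetD (pvPrefixB s2 t).1 z 0 + PySem.List.pyGetD (pvPrefixB s1 t).1 (s1.length : Int) 0 - PySem.List.pyGetD (pvPrefixB s1 t).1 z 0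
         + PySem.List.pyGetD (pvPrefixB s2 t).1 (s2.length : Int) 0 - PySem.List.pyGetD (pvPrefixB s2 t).1 (s1.length : Int) 0)
    else
      (PySem.List.pyGetD (pvPrefixB s1 t).1 (s1.length : Int) 0, PySem.List.pyGetD (pvPrefixB s2 t).1 (s2.length : Int) 0)) := by
  obtain ⟨n, rfl⟩ : ∃ n : Nat, z = (n : Int) := ⟨z.toNat, (Int.toNat_of_nonneg hz).symm⟩
  simp only [pvPrefixB_eq, PySem.List.pyGetD_natCast, Nat.cast_lt]
  by_cases hlt : n < s1.length
  · rw [if_pos hlt]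
    rw [pvSPC_eq s1 s2 n (le_of_lt hlt) h]
    rw [PySem.List.getD_map_range _ _ _ _ (by omega), PySem.List.getD_map_range _ _ _ _ (by omega),
      PySem.List.getD_map_range _ _ _ _ (by omega), PySem.List.getD_map_range _ _ _ _ (by omega),
      PySem.List.getD_map_range _ _ _ _ (by omega)]
    rw [List.take_length, List.take_length]
    rw [pvCountFitness_eq, pvCountFitness_eq]
    have hA1 : pvMC (s1.take n ++ (s2.drop n).take (s1.length - n)) t
        = pvMC (s1.take n) t + pvMC ((s2.drop n).take (s1.length - n)) (t.drop n) := by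
      rw [pvMC_append, List.length_take, Nat.min_eq_left (le_of_lt hlt)]
    have hA2 : pvMC (s2.take n ++ s1.drop n ++ s2.drop s1.length) t
        = pvMC (s2.take n) t + (pvMC (s1.drop n) (t.drop n) + pvMC (s2.drop s1.length) (t.drop s1.length)) := by
      rw [List.append_assoc, pvMC_append, pvMC_append, List.length_take, List.length_drop,
        Nat.min_eq_left (by omega), List.drop_drop]
      have : n + (s1.length - n) = s1.length := by omega
      rw [this]
    have h1 := pvMC_append (s1.take n) (s1.drop n) t
    rw [List.take_append_drop, List.length_take, Nat.min_eq_left (le_of_lt hlt)] at h1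
    have h4 := pvMC_append (s2.take s1.length) (s2.drop s1.length) t
    rw [List.take_append_drop, List.length_take, Nat.min_eq_left h] at h4
    have h3 := pvMC_append (s2.take n) ((s2.drop n).take (s1.length - n)) t
    rw [← List.take_add] at h3
    have hnn : n + (s1.length - n) = s1.length := by omega
    rw [hnn, List.length_take, Nat.min_eq_left (by omega)] at h3
    rw [Prod.mk.injEq]
    constructor
    · rw [hA1]; linarith
    · rw [hA2]; linarith
  · rw [if_neg hlt]
    unfold pvSinglePointCrossover
    rw [PySem.List.pyRange_one_eq_nil (by exact_mod_cast Nat.le_of_not_lt hlt)]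
    simp only [List.foldl_nil]
    rw [PySem.List.getD_map_range _ _ _ _ (by omega), PySem.List.getD_map_range _ _ _ _ (by omega)]
    rw [List.take_length, List.take_length, pvCountFitness_eq, pvCountFitness_eq]

lemma pvLoop_eq (s1 s2 t : List Char) (h : s1.length ≤ s2.length) (l : List Int)
    (hl : ∀ z ∈ l, 0 ≤ z) :
    ∀ (bf bc : Int) (t1 t2 : List Char),
      ((l.foldl (pvStepA s1 s2 t) (bf, t1, t2, bc)).1,
       (l.foldl (pvStepA s1 s2 t) (bf, t1, t2, bc)).2.2.2) =
      l.foldl (pvStepB (pvPrefixB s1 t).1 (pvPrefixB s2 t).1 (s1.length : Int) (s2.length : Int)) (bf, bc) := by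
  induction l with
  | nil => intro bf bc t1 t2; simp
  | cons z l ih =>
    intro bf bc t1 t2
    have hl' : ∀ y ∈ l, 0 ≤ y := fun y hy => hl y (List.mem_cons_of_mem z hy)
    have ih' := ih hl'
    have hfits := pvFits_eq s1 s2 t h z (hl z List.mem_cons_self)
    simp only [List.foldl_cons]
    simp only [pvStepA, pvStepB]
    rw [← hfits]
    simp only [Prod.fst, Prod.snd]
    split_ifs <;> first
      | exact ih' _ _ _ _
      | omega

-- ===== VERDICT (by name: the statement is the Claim_ definition above) =====
theorem best_crossover_point_spec : Claim_equal_best_crossover_point := by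
  intro string1 string2 target_string _hdom hpre
  unfold Spec_best_crossover_point best_crossover_point best_crossover_point_alt
  have := pvLoop_eq string1.toList string2.toList target_string.toList hpre
    (PySem.List.pyRange 0 30 1) (by intro z hz; exact ((PySem.List.mem_pyRange_one).1 hz).1) 0 0 [] []
  simpa using congrArg Prod.snd this
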